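-- pv_equiv track=rewrite | github.com/vdedourek2/FlaskRestApi | Processing/qna_lch_mod.py | _get_citation_chain
-- ===== SOURCE A (Python) =====
-- def _get_citation_chain(
--     response:dict,
--     citation_field:str = "source",
--     ) -> str:
--     """
--     Return reference list to web pages. Maximum citations = 1.
--     For example
--
--     Další informace:
--     1. https://www.multima.cz
--     2. https://www.multima.cz/mentor
--     3. https://www.keymate.cz
--     -------------------------------------------------------------------------
--     response - response object from ConversationalRetrievalChain()
--     citation_field - citation field in metadata, which is used for citation
--
--     returns text citation list
--     """
--     max_citations = 1
--
--     if response == None: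
--         return ""
--
--     reference_list = []
--
--     # select web references with order
--     for item in response["documents"]:
--         ref = item.get(citation_field)
--         if ref and (ref not in reference_list):
--             reference_list.append(ref)
--
--     # create reference text
--     citation_text = ""
--     for row, item in enumerate(reference_list, 1):
--         citation_text += f"\n{row}. {item}"
--
--         if row >= max_citations:
--             break;
--
--     if citation_text != "":
--         citation_text = "\nDalší informace:" + citation_text
--
--     return citation_text
-- ===== SOURCE B (Python) =====
-- def _get_citation_chain(
--     response:dict,
--     citation_field:str = "source",
--     ) -> str:
--     # Single early-returning scan: return the citation text for the first
--     # truthy reference; no intermediate deduplicated list is built.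
--     if response == None:
--         return ""
--     for item in response["documents"]:
--         ref = item.get(citation_field)
--         if ref:
--             return "\nDalší informace:\n1. " + ref
--     return ""
-- ===== Notes on version B (the rewrite author's own statement) =====
-- stated objective: simpler
-- what changed: Replaces A's two sequential passes (build a deduplicated reference list, then a formatting loop that breaks after max_citations=1) by a single scan over response["documents"] that returns the formatted citation at the first truthy reference.
-- outside the precondition, e.g. on _get_citation_chain({}, 'source'): A raises KeyError, B raises KeyError
import Mathlib
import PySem

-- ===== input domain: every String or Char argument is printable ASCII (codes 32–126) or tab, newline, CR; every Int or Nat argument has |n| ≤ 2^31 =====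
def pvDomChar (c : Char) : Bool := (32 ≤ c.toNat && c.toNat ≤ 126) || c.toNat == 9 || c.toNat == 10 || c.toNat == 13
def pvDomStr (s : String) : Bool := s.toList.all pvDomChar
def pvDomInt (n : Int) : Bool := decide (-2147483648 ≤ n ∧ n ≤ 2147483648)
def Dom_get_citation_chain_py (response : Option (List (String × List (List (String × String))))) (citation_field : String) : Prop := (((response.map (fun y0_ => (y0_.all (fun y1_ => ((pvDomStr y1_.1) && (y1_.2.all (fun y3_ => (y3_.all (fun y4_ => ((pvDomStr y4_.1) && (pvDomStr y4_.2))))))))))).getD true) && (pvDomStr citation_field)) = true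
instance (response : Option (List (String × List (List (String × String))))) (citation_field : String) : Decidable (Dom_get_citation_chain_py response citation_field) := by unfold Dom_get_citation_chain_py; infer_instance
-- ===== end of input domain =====

-- B replaces A's two passes (dedup-collect, then format-with-break) by one early-returning
-- scan for the first truthy reference; return values agree wherever A returns.

-- ===== PORT A =====
-- one step of A's collection loop: ref = item.get(cf); if ref and (ref not in reference_list): append
def pvAStep (citation_field : String) (acc : List String) (item : List (String × String)) : List String :=
  match item.lookup citation_field with
  | some ref => if ref ≠ "" ∧ ref ∉ acc then acc ++ [ref] else acc
  | none => acc

-- A's formatting loop: for row, item in enumerate(reference_list, 1): …; break once row >= max_citations (= 1)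
def pvAFormat : List String → Int → String → String
  | [], _, ct => ct
  | item :: rest, row, ct =>
    let ct' := ct ++ "\n" ++ PySem.Int.toStr row ++ ". " ++ item
    if 1 ≤ row then ct' else pvAFormat rest (row + 1) ct'

def get_citation_chain_py (response : Option (List (String × List (List (String × String))))) (citation_field : String) : String :=
  match response with
  | none => ""
  | some d =>
    -- response["documents"]: Pre_ guarantees the key is present (Python raises KeyError otherwise)
    let docs := (d.lookup "documents").getD []
    let reference_list := docs.foldl (pvAStep citation_field) []
    let citation_text := pvAFormat reference_list 1 ""
    if citation_text ≠ "" then "\nDalší informace:" ++ citation_text else citation_text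

-- ===== PORT B =====
-- B's single scan: return on the first truthy reference
def pvBScan (citation_field : String) : List (List (String × String)) → String
  | [] => ""
  | item :: rest =>
    match item.lookup citation_field with
    | some ref => if ref ≠ "" then "\nDalší informace:\n1. " ++ ref else pvBScan citation_field rest
    | none => pvBScan citation_field rest

def get_citation_chain_py_alt (response : Option (List (String × List (List (String × String))))) (citation_field : String) : String :=
  match response with
  | none => ""
  | some d => pvBScan citation_field ((d.lookup "documents").getD [])

-- ===== PRECONDITION & SPEC =====
-- Pre_ excludes only the inputs where A raises KeyError: a non-None response without a "documents" key (B raises there too).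
def Pre_get_citation_chain_py (response : Option (List (String × List (List (String × String))))) (_citation_field : String) : Prop :=
  (response.map (fun d => (d.lookup "documents").isSome)).getD true = true
instance (response : Option (List (String × List (List (String × String))))) (citation_field : String) : Decidable (Pre_get_citation_chain_py response citation_field) := by unfold Pre_get_citation_chain_py; infer_instance

def pvWitness_get_citation_chain_py : (Option (List (String × List (List (String × String))))) × String :=
  (some [("documents", [[("source", "https://www.multima.cz")]])], "source")

def Spec_get_citation_chain_py (response : Option (List (String × List (List (String × String))))) (citation_field : String) (out : String) : Prop := out = get_citation_chain_py_alt response citation_field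
instance (response : Option (List (String × List (List (String × String))))) (citation_field : String) (out : String) : Decidable (Spec_get_citation_chain_py response citation_field out) := by unfold Spec_get_citation_chain_py; infer_instance

-- ===== CLAIM (what is proved, stated in full; the proofs are below) =====
def Claim_equal_get_citation_chain_py : Prop := ∀ (response : Option (List (String × List (List (String × String))))) (citation_field : String), Dom_get_citation_chain_py response citation_field → Pre_get_citation_chain_py response citation_field → Spec_get_citation_chain_py response citation_field (get_citation_chain_py response citation_field)

-- ===== LEMMAS AND PROOFS =====

-- once A's reference list is nonempty, its head never changes
theorem pvFoldl_head (cf : String) (rest : List (List (String × String))) :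
    ∀ (acc : List String) (r : String), ∃ t, rest.foldl (pvAStep cf) (r :: acc) = r :: t := by
  induction rest with
  | nil => exact fun acc r => ⟨acc, rfl⟩
  | cons item rest ih =>
    intro acc r
    simp only [List.foldl_cons]
    unfold pvAStep
    cases item.lookup cf with
    | none => exact ih acc r
    | some ref =>
      by_cases h : ref ≠ "" ∧ ref ∉ r :: acc
      · simp only [if_pos h]; exact ih (acc ++ [ref]) r
      · simp only [if_neg h]; exact ih acc r

-- the core: A's some-branch pipeline equals B's single scan
theorem pvPipeline_eq (cf : String) (docs : List (List (String × String))) :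
    (let rl := docs.foldl (pvAStep cf) [];
     let ct := pvAFormat rl 1 "";
     if ct ≠ "" then "\nDalší informace:" ++ ct else ct) = pvBScan cf docs := by
  induction docs with
  | nil => rfl
  | cons item rest ih =>
    simp only [List.foldl_cons]
    unfold pvBScan
    cases hl : item.lookup cf with
    | none =>
      simpa only [pvAStep, hl] using ih
    | some ref =>
      by_cases href : ref = ""
      · subst href
        have : pvAStep cf [] item = [] := by
          simp [pvAStep, hl]
        rw [this]
        simpa using ih
      · have hstep : pvAStep cf [] item = [ref] := by
          simp [pvAStep, hl, href]
        rw [hstep]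
        obtain ⟨t, ht⟩ := pvFoldl_head cf rest [] ref
        rw [ht]
        have hct : pvAFormat (ref :: t) 1 "" = "" ++ "\n" ++ PySem.Int.toStr 1 ++ ". " ++ ref := by
          unfold pvAFormat; simp
        simp only [hct]
        have hne : ("" ++ "\n" ++ PySem.Int.toStr 1 ++ ". " ++ ref) ≠ "" := by
          simp [String.ext_iff]
        rw [if_pos hne]
        simp only [href, ne_eq, not_false_eq_true, if_true]
        rfl

-- ===== VERDICT (by name: the statement is the Claim_ definition above) =====
theorem get_citation_chain_py_spec : Claim_equal_get_citation_chain_py := by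
  intro response citation_field _ hpre
  unfold Spec_get_citation_chain_py get_citation_chain_py get_citation_chain_py_alt
  cases response with
  | none => rfl
  | some d => exact pvPipeline_eq citation_field ((d.lookup "documents").getD [])
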